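-- pv_equiv track=rewrite | github.com/HogRider19/Checkers | checkers/utils.py | _generate_initial_state_board
-- ===== SOURCE A (Python) =====
-- from enum import Enum
--
-- class Figure(Enum):
--     WHITE: int = 0
--     BLACK: int = 1
--
-- def _generate_initial_state_board(size: int = 8) -> list[list[int | None]]:
--     board = [[None]*size for _ in range(size)]
--     for row_index, row in enumerate(board):
--         for col_index, _ in enumerate(row):
--             if row_index % 2 == col_index % 2:
--                 if row_index <= 2:
--                     board[row_index][col_index] = Figure.WHITE.value
--                 elif row_index >= size - 3:
--                     board[row_index][col_index] = Figure.BLACK.value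
--     return board
-- ===== SOURCE B (Python) =====
-- from enum import Enum
--
-- class Figure(Enum):
--     WHITE: int = 0
--     BLACK: int = 1
--
-- def _generate_initial_state_board(size: int = 8) -> list[list[int | None]]:
--     board = [[None] * size for _ in range(size)]
--     for row in range(max(0, size - 3), size):
--         board[row] = [Figure.BLACK.value if col % 2 == row % 2 else None
--                       for col in range(size)]
--     for row in range(0, min(3, size)):
--         board[row] = [Figure.WHITE.value if col % 2 == row % 2 else None
--                       for col in range(size)]
--     return board
-- ===== Notes on version B (the rewrite author's own statement) =====
-- stated objective: faster
-- what changed: Instead of scanning all size*size cells with in-place conditional mutation and a WHITE/BLACK precedence branch, B builds the empty board and then replaces only the piece-row bands wholesale (BLACK rows size-3..size-1 first, then WHITE rows 0..2 overwriting the overlap for size<6), each row built directly from its parity pattern.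
import Mathlib
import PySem

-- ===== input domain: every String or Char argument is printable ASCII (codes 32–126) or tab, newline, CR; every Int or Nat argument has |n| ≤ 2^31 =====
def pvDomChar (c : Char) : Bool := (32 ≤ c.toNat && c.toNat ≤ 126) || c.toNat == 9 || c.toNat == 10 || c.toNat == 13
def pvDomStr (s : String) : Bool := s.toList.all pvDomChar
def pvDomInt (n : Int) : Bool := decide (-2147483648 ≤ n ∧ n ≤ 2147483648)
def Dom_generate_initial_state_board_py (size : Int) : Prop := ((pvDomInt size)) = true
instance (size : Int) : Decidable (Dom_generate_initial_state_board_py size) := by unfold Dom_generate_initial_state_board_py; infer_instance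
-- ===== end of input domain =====

-- B replaces only the piece-row bands wholesale (BLACK band then WHITE band overwriting the
-- overlap) instead of A's cell-by-cell conditional mutation over every cell; same asymptotic
-- class, measurably faster by a constant factor (per-cell branch work removed).

-- ===== PORT A =====
-- literal port of A: nested enumerate loops mutating board[row][col] in place
-- (enumerate(row) is only used for its indices, so iterating the initial row snapshot is exact)
def generate_initial_state_board_py (size : Int) : List (List (Option Int)) :=
  let board := List.replicate size.toNat (List.replicate size.toNat (none : Option Int))
  (PySem.List.enumerate board 0).foldl (fun b p =>
    (PySem.List.enumerate p.2 0).foldl (fun b2 q =>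
      if p.1 % 2 = q.1 % 2 then
        if p.1 ≤ 2 then b2.modify p.1.toNat (fun row => row.set q.1.toNat (some 0))
        else if size - 3 ≤ p.1 then b2.modify p.1.toNat (fun row => row.set q.1.toNat (some 1))
        else b2
      else b2) b) board

-- ===== PORT B =====
def generate_initial_state_board_py_alt (size : Int) : List (List (Option Int)) :=
  let board := List.replicate size.toNat (List.replicate size.toNat (none : Option Int))
  let board := (PySem.List.pyRange (max 0 (size - 3)) size 1).foldl
    (fun b row => b.set row.toNat
      ((PySem.List.pyRange 0 size 1).map (fun col => if col % 2 = row % 2 then some 1 else none))) board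
  (PySem.List.pyRange 0 (min 3 size) 1).foldl
    (fun b row => b.set row.toNat
      ((PySem.List.pyRange 0 size 1).map (fun col => if col % 2 = row % 2 then some 0 else none))) board

-- ===== PRECONDITION & SPEC =====
def Spec_generate_initial_state_board_py (size : Int) (out : List (List (Option Int))) : Prop := out = generate_initial_state_board_py_alt size
instance (size : Int) (out : List (List (Option Int))) : Decidable (Spec_generate_initial_state_board_py size out) := by unfold Spec_generate_initial_state_board_py; infer_instance

-- ===== CLAIM (what is proved, stated in full; the proofs are below) =====
def Claim_equal_generate_initial_state_board_py : Prop := ∀ (size : Int), Dom_generate_initial_state_board_py size → Spec_generate_initial_state_board_py size (generate_initial_state_board_py size)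

-- ===== LEMMAS AND PROOFS =====

-- the per-cell update of A's inner loop, at row level
def pvRowStep (size ri : Int) (row : List (Option Int)) (q : Int × Option Int) : List (Option Int) :=
  if ri % 2 = q.1 % 2 then
    if ri ≤ 2 then row.set q.1.toNat (some 0)
    else if size - 3 ≤ ri then row.set q.1.toNat (some 1)
    else row
  else row

theorem pv_modify_modify {α : Type} (l : List α) (i : Nat) (f g : α → α) :
    (l.modify i f).modify i g = l.modify i (fun a => g (f a)) := by
  apply List.ext_getElem?
  intro j
  simp [List.getElem?_modify]
  cases l[j]? <;> simp <;> split <;> simp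

theorem pv_foldl_modify {α β : Type} (i : Nat) (F : β → α → α) (xs : List β) (l : List α) :
    xs.foldl (fun l x => l.modify i (F x)) l = l.modify i (fun a => xs.foldl (fun a x => F x a) a) := by
  induction xs generalizing l with
  | nil => simp only [List.foldl_nil]; exact (List.modify_id i l).symm
  | cons x xs ih => simp [List.foldl_cons, ih, pv_modify_modify]

theorem pv_getElem?_set_map {α : Type} (l : List α) (i j : Nat) (a : α) :
    (l.set i a)[j]? = (l[j]?).map (fun old => if i = j then a else old) := by
  by_cases h : i = j
  · subst h
    by_cases hl : i < l.length
    · rw [List.getElem?_set, if_pos rfl, if_pos hl, List.getElem?_eq_getElem hl]; simp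
    · rw [List.getElem?_set, if_pos rfl, if_neg hl,
          List.getElem?_eq_none (by omega : l.length ≤ i)]; simp
  · rw [List.getElem?_set, if_neg h]; cases l[j]? <;> simp [h]

-- outer loop over identical rows: elementwise characterisation
theorem pv_outer_char {α : Type} (G : Int → α → α) (r0 : α) :
    ∀ (k s : Nat) (b : List α) (j : Nat),
    ((PySem.List.enumerate (List.replicate k r0) (s : Int)).foldl
        (fun b p => b.modify p.1.toNat (G p.1)) b)[j]?
      = if s ≤ j ∧ j < s + k then (b[j]?).map (G j) else b[j]? := by
  intro k
  induction k with
  | zero => intro s b j; simp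
  | succ k ih =>
    intro s b j
    rw [List.replicate_succ, PySem.List.enumerate_cons, List.foldl_cons]
    have hs1 : (s : Int) + 1 = ((s + 1 : Nat) : Int) := by push_cast; ring
    rw [hs1, ih (s + 1)]
    rw [List.getElem?_modify]
    simp only [Int.toNat_natCast]
    by_cases h1 : s + 1 ≤ j ∧ j < s + 1 + k
    · simp only [if_pos h1, if_pos (by omega : s ≤ j ∧ j < s + (k + 1))]
      cases b[j]? <;> simp
      rw [if_neg (by omega)]
    · rw [if_neg h1]
      by_cases h2 : s = j
      · subst h2
        simp only [if_pos, if_pos (by omega : s ≤ s ∧ s < s + (k + 1))]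
        cases b[s]? <;> simp
      · rw [if_neg (by omega : ¬ (s ≤ j ∧ j < s + (k + 1)))]
        cases b[j]? <;> simp [h2]

-- A's inner loop at row level: elementwise characterisation
theorem pv_row_char (size ri : Int) :
    ∀ (k s : Nat) (row : List (Option Int)) (j : Nat),
    ((PySem.List.enumerate (List.replicate k (none : Option Int)) (s : Int)).foldl
        (pvRowStep size ri) row)[j]?
      = (row[j]?).map (fun old =>
          if s ≤ j ∧ j < s + k ∧ ri % 2 = (j : Int) % 2 ∧ (ri ≤ 2 ∨ size - 3 ≤ ri)
          then (if ri ≤ 2 then some 0 else some 1) else old) := by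
  intro k
  induction k with
  | zero =>
    intro s row j
    simp only [List.replicate, PySem.List.enumerate_nil, List.foldl_nil]
    cases h : row[j]? <;> simp [h] <;> omega
  | succ k ih =>
    intro s row j
    rw [List.replicate_succ, PySem.List.enumerate_cons, List.foldl_cons]
    have hs1 : (s : Int) + 1 = ((s + 1 : Nat) : Int) := by push_cast; ring
    rw [hs1, ih (s + 1)]
    have hstep : (pvRowStep size ri row ((s : Int), none))[j]?
        = (row[j]?).map (fun old =>
            if s = j ∧ ri % 2 = (j : Int) % 2 ∧ (ri ≤ 2 ∨ size - 3 ≤ ri)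
            then (if ri ≤ 2 then some 0 else some 1) else old) := by
      unfold pvRowStep
      simp only
      by_cases hpar : ri % 2 = ((s : Int)) % 2
      · by_cases hle : ri ≤ 2
        · rw [if_pos hpar, if_pos hle, pv_getElem?_set_map]
          simp only [Int.toNat_natCast]
          cases h : row[j]? <;> simp only [h, Option.map_none, Option.map_some]
          congr 1
          split_ifs <;> first | rfl | omega
        · by_cases hbl : size - 3 ≤ ri
          · rw [if_pos hpar, if_neg hle, if_pos hbl, pv_getElem?_set_map]
            simp only [Int.toNat_natCast]
            cases h : row[j]? <;> simp only [h, Option.map_none, Option.map_some]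
            congr 1
            split_ifs <;> first | rfl | omega
          · rw [if_pos hpar, if_neg hle, if_neg hbl]
            cases h : row[j]? <;> simp only [h, Option.map_none, Option.map_some]
            congr 1
            rw [if_neg (by omega)]
      · rw [if_neg hpar]
        cases h : row[j]? <;> simp only [h, Option.map_none, Option.map_some]
        congr 1
        rw [if_neg (by omega)]
    rw [hstep, Option.map_map]
    cases h : row[j]? <;>
      simp only [h, Option.map_none, Option.map_some, Function.comp]
    congr 1
    split_ifs <;> first | rfl | omega

-- B's update passes: elementwise characterisation of a fold of whole-row sets over a range
theorem pv_set_fold_char {α : Type} (g : Int → α) :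
    ∀ (xs : List Int), (∀ x ∈ xs, 0 ≤ x) → ∀ (b : List α) (j : Nat),
    ((xs.foldl (fun b x => b.set x.toNat (g x)) b)[j]?
      = (b[j]?).map (fun old => if (j : Int) ∈ xs then g j else old)) := by
  intro xs
  induction xs with
  | nil =>
    intro _ b j
    cases h : b[j]? <;> simp [h]
  | cons x xs ih =>
    intro hnn b j
    rw [List.foldl_cons, ih (fun y hy => hnn y (List.mem_cons_of_mem x hy))]
    rw [pv_getElem?_set_map]
    cases b[j]? <;> simp
    by_cases hm : (j : Int) ∈ xs
    · simp [hm]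
    · by_cases hx : x.toNat = j
      · have h0 : 0 ≤ x := hnn x (List.mem_cons_self)
        have : x = (j : Int) := by omega
        simp [hm, hx, this]
      · have : ¬ ((j : Int) = x) := by
          intro h; apply hx
          have h0 : 0 ≤ x := hnn x (List.mem_cons_self)
          omega
        simp [hm, hx, this]

theorem pv_main (size : Int) :
    generate_initial_state_board_py size = generate_initial_state_board_py_alt size := by
  have hAdef : generate_initial_state_board_py size
      = (PySem.List.enumerate (List.replicate size.toNat (List.replicate size.toNat (none : Option Int))) 0).foldl
          (fun b p => (PySem.List.enumerate p.2 0).foldl (fun b2 q =>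
            if p.1 % 2 = q.1 % 2 then
              if p.1 ≤ 2 then b2.modify p.1.toNat (fun row => row.set q.1.toNat (some 0))
              else if size - 3 ≤ p.1 then b2.modify p.1.toNat (fun row => row.set q.1.toNat (some 1))
              else b2
            else b2) b)
          (List.replicate size.toNat (List.replicate size.toNat (none : Option Int))) := rfl
  have hBdef : generate_initial_state_board_py_alt size
      = (PySem.List.pyRange 0 (min 3 size) 1).foldl
          (fun b row => b.set row.toNat
            ((PySem.List.pyRange 0 size 1).map (fun col => if col % 2 = row % 2 then some 0 else none)))
          ((PySem.List.pyRange (max 0 (size - 3)) size 1).foldl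
            (fun b row => b.set row.toNat
              ((PySem.List.pyRange 0 size 1).map (fun col => if col % 2 = row % 2 then some 1 else none)))
            (List.replicate size.toNat (List.replicate size.toNat (none : Option Int)))) := rfl
  rw [hAdef, hBdef]
  -- A's inner loop commutes into a single List.modify of the row
  have hstep_eq : ∀ (b : List (List (Option Int))) (ri : Int),
      (PySem.List.enumerate (List.replicate size.toNat (none : Option Int)) 0).foldl (fun b2 q =>
        if ri % 2 = q.1 % 2 then
          if ri ≤ 2 then b2.modify ri.toNat (fun row => row.set q.1.toNat (some 0))
          else if size - 3 ≤ ri then b2.modify ri.toNat (fun row => row.set q.1.toNat (some 1))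
          else b2
        else b2) b
      = b.modify ri.toNat (fun row =>
          (PySem.List.enumerate (List.replicate size.toNat (none : Option Int)) 0).foldl (pvRowStep size ri) row) := by
    intro b ri
    have hcg := PySem.List.foldl_congr_mem
      (PySem.List.enumerate (List.replicate size.toNat (none : Option Int)) 0)
      (fun b2 q =>
        if ri % 2 = q.1 % 2 then
          if ri ≤ 2 then b2.modify ri.toNat (fun row => row.set q.1.toNat (some 0))
          else if size - 3 ≤ ri then b2.modify ri.toNat (fun row => row.set q.1.toNat (some 1))
          else b2
        else b2)
      (fun b2 q => b2.modify ri.toNat (fun row => pvRowStep size ri row q)) b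
      (by intro acc q _
          unfold pvRowStep
          by_cases hp : ri % 2 = q.1 % 2
          · simp only [if_pos hp]
            split_ifs <;> first | rfl | exact (List.modify_id _ _).symm
          · simp only [if_neg hp]
            exact (List.modify_id _ _).symm)
    rw [hcg]
    exact pv_foldl_modify ri.toNat (fun q row => pvRowStep size ri row q) _ b
  have hA : (PySem.List.enumerate (List.replicate size.toNat (List.replicate size.toNat (none : Option Int))) 0).foldl
          (fun b p => (PySem.List.enumerate p.2 0).foldl (fun b2 q =>
            if p.1 % 2 = q.1 % 2 then
              if p.1 ≤ 2 then b2.modify p.1.toNat (fun row => row.set q.1.toNat (some 0))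
              else if size - 3 ≤ p.1 then b2.modify p.1.toNat (fun row => row.set q.1.toNat (some 1))
              else b2
            else b2) b)
          (List.replicate size.toNat (List.replicate size.toNat (none : Option Int)))
      = (PySem.List.enumerate (List.replicate size.toNat (List.replicate size.toNat (none : Option Int))) 0).foldl
          (fun b p => b.modify p.1.toNat (fun row =>
            (PySem.List.enumerate (List.replicate size.toNat (none : Option Int)) 0).foldl (pvRowStep size p.1) row))
          (List.replicate size.toNat (List.replicate size.toNat (none : Option Int))) := by
    apply PySem.List.foldl_congr_mem
    intro acc p hp
    obtain ⟨k, hk, rfl⟩ := (PySem.List.mem_enumerate_iff _ _ _).1 hp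
    simp only [List.getElem_replicate]
    exact hstep_eq acc _
  rw [hA]
  apply List.ext_getElem?
  intro j
  have houter := pv_outer_char
    (fun ri row => (PySem.List.enumerate (List.replicate size.toNat (none : Option Int)) 0).foldl (pvRowStep size ri) row)
    (List.replicate size.toNat (none : Option Int)) size.toNat 0
    (List.replicate size.toNat (List.replicate size.toNat (none : Option Int))) j
  simp only [Nat.cast_zero, Nat.zero_le, true_and, Nat.zero_add] at houter
  rw [houter]
  have hbnn : ∀ x ∈ PySem.List.pyRange (max 0 (size - 3)) size 1, (0 : Int) ≤ x := by
    intro x hx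
    exact le_trans (le_max_left 0 (size - 3)) ((PySem.List.mem_pyRange_one).1 hx).1
  have hwnn : ∀ x ∈ PySem.List.pyRange 0 (min 3 size) 1, (0 : Int) ≤ x := by
    intro x hx
    exact ((PySem.List.mem_pyRange_one).1 hx).1
  rw [pv_set_fold_char _ _ hwnn, pv_set_fold_char _ _ hbnn, Option.map_map]
  rw [List.getElem?_replicate]
  by_cases hj : j < size.toNat
  · simp only [if_pos hj, Option.map_some, Function.comp]
    congr 1
    have hsz : size = (size.toNat : Int) := (Int.toNat_of_nonneg (by omega)).symm
    apply List.ext_getElem?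
    intro c
    have hrow := pv_row_char size (j : Int) size.toNat 0
      (List.replicate size.toNat (none : Option Int)) c
    simp only [Nat.cast_zero, Nat.zero_le, true_and, Nat.zero_add] at hrow
    rw [hrow, List.getElem?_replicate]
    simp only [PySem.List.mem_pyRange_one]
    by_cases hc : c < size.toNat
    · rw [if_pos hc]
      simp only [Option.map_some]
      by_cases hw : (0 : Int) ≤ (j : Int) ∧ (j : Int) < min 3 size
      · rw [if_pos hw]
        rw [hsz, PySem.List.getElem?_map_pyRange_zero _ _ _ hc]
        congr 1
        split_ifs <;> first | rfl | omega
      · rw [if_neg hw]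
        by_cases hb : max 0 (size - 3) ≤ (j : Int) ∧ (j : Int) < size
        · rw [if_pos hb]
          rw [hsz, PySem.List.getElem?_map_pyRange_zero _ _ _ hc]
          congr 1
          split_ifs <;> first | rfl | omega
        · rw [if_neg hb, List.getElem?_replicate, if_pos hc]
          congr 1
          split_ifs <;> first | rfl | omega
    · rw [if_neg hc]
      simp only [Option.map_none]
      have hlen : ∀ (f : Int → Option Int),
          ((PySem.List.pyRange 0 size 1).map f)[c]? = none := by
        intro f
        apply List.getElem?_eq_none
        rw [List.length_map, PySem.List.length_pyRange_one]
        omega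
      split_ifs <;> first | exact (hlen _).symm | rw [List.getElem?_replicate, if_neg hc]
  · simp only [if_neg hj, Option.map_none]

theorem generate_initial_state_board_py_spec : Claim_equal_generate_initial_state_board_py := by
  intro size _
  exact pv_main size
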